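-- pv_equiv track=rewrite | github.com/RuisongZhou/KGE_pytorch | utils/evaluate.py | argwhereHead
-- ===== SOURCE A (Python) =====
-- def argwhereHead(head, tail, rel, array, tripleDict):
--     wrongAnswer = 0
--     for num in array:
--         if num == head:
--             return wrongAnswer
--         elif (num, tail, rel) in tripleDict:
--             continue
--         else:
--             wrongAnswer += 1
--     return wrongAnswer
-- ===== SOURCE B (Python) =====
-- def argwhereHead(head, tail, rel, array, tripleDict):
--     idx = array.index(head) if head in array else len(array)
--     prefix = array[:idx]
--     return sum(1 for num in prefix if (num, tail, rel) not in tripleDict)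
-- ===== Notes on version B (the rewrite author's own statement) =====
-- stated objective: simpler
-- what changed: Replaces the early-returning counting loop by a locate-then-count decomposition: find the cut point with list.index (whole list if head is absent), slice the prefix, and count prefix elements missing from tripleDict with a generator sum.
import Mathlib
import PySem

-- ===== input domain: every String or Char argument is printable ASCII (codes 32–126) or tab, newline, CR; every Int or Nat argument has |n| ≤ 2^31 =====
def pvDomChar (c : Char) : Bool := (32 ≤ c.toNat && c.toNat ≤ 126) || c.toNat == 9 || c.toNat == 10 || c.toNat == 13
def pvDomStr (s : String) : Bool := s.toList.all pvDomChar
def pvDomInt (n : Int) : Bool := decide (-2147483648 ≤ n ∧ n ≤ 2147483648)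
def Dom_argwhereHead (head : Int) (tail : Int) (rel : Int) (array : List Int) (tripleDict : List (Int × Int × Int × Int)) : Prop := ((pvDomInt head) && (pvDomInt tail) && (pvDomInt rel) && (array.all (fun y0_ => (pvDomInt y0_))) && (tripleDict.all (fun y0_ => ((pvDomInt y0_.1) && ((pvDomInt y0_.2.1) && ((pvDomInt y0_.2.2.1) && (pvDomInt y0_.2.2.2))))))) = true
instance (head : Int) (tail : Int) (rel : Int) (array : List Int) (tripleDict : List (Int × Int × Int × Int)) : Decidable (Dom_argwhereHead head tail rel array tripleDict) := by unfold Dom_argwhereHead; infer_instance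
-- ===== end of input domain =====

-- B replaces A's early-returning counting loop by locate-then-count: cut the list at the
-- first occurrence of head (whole list if absent) and count prefix elements not in tripleDict.

-- ===== PORT A =====
-- '(num, tail, rel) in tripleDict' : key membership in the dict (keys are the first three components)
def pvKeyMem (num tail rel : Int) (tripleDict : List (Int × Int × Int × Int)) : Bool :=
  tripleDict.any (fun e => e.1 == num && e.2.1 == tail && e.2.2.1 == rel)

-- the for-loop with early return, carrying the 'wrongAnswer' accumulator
def argwhereHeadGo (head tail rel : Int) (tripleDict : List (Int × Int × Int × Int)) :
    List Int → Int → Int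
  | [], wrongAnswer => wrongAnswer
  | num :: rest, wrongAnswer =>
    if num == head then wrongAnswer
    else if pvKeyMem num tail rel tripleDict then argwhereHeadGo head tail rel tripleDict rest wrongAnswer
    else argwhereHeadGo head tail rel tripleDict rest (wrongAnswer + 1)

def argwhereHead (head : Int) (tail : Int) (rel : Int) (array : List Int) (tripleDict : List (Int × Int × Int × Int)) : Int :=
  argwhereHeadGo head tail rel tripleDict array 0

-- ===== PORT B =====
def argwhereHead_alt (head : Int) (tail : Int) (rel : Int) (array : List Int) (tripleDict : List (Int × Int × Int × Int)) : Int :=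
  -- idx = array.index(head) if head in array else len(array)
  let idx : Nat := match PySem.List.index? array head with
    | some i => i
    | none => array.length
  -- prefix = array[:idx]
  let pref := PySem.List.slice array none (some (idx : Int))
  -- sum(1 for num in prefix if (num, tail, rel) not in tripleDict)
  ((pref.countP (fun num => ! pvKeyMem num tail rel tripleDict)) : Int)

-- ===== PRECONDITION & SPEC =====
def Spec_argwhereHead (head : Int) (tail : Int) (rel : Int) (array : List Int) (tripleDict : List (Int × Int × Int × Int)) (out : Int) : Prop := out = argwhereHead_alt head tail rel array tripleDict
instance (head : Int) (tail : Int) (rel : Int) (array : List Int) (tripleDict : List (Int × Int × Int × Int)) (out : Int) : Decidable (Spec_argwhereHead head tail rel array tripleDict out) := by unfold Spec_argwhereHead; infer_instance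

-- ===== CLAIM (what is proved, stated in full; the proofs are below) =====
def Claim_equal_argwhereHead : Prop := ∀ (head : Int) (tail : Int) (rel : Int) (array : List Int) (tripleDict : List (Int × Int × Int × Int)), Dom_argwhereHead head tail rel array tripleDict → Spec_argwhereHead head tail rel array tripleDict (argwhereHead head tail rel array tripleDict)

-- ===== LEMMAS AND PROOFS =====

-- recursive characterisation of B's value
def pvCnt (head tail rel : Int) (tripleDict : List (Int × Int × Int × Int)) : List Int → Int
  | [] => 0
  | num :: rest =>
    if num == head then 0
    else (if pvKeyMem num tail rel tripleDict then 0 else 1) + pvCnt head tail rel tripleDict rest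

lemma alt_eq_cnt (head tail rel : Int) (array : List Int) (tripleDict : List (Int × Int × Int × Int)) :
    argwhereHead_alt head tail rel array tripleDict = pvCnt head tail rel tripleDict array := by
  induction array with
  | nil => simp [argwhereHead_alt, pvCnt]
  | cons num rest ih =>
    by_cases h : num = head
    · subst h
      simp only [argwhereHead_alt, PySem.List.index?_cons_self]
      rw [PySem.List.slice_to_natCast]
      simp [pvCnt]
    · have hne : (num == head) = false := by simp [h]
      simp only [argwhereHead_alt, PySem.List.index?_cons_of_ne rest h] at ih ⊢
      rw [pvCnt, hne]
      simp only [Bool.false_eq_true, if_false]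
      cases hidx : PySem.List.index? rest head with
      | none =>
        simp only [hidx, Option.map_none] at ih ⊢
        rw [show (num :: rest).length = rest.length + 1 from by simp]
        rw [PySem.List.slice_to_natCast] at ih
        rw [PySem.List.slice_to_natCast]
        simp only [List.take_succ_cons, List.countP_cons]; rw [← ih]
        by_cases hm : pvKeyMem num tail rel tripleDict = true <;> simp [hm] <;> omega
      | some i =>
        simp only [hidx, Option.map_some] at ih ⊢
        rw [PySem.List.slice_to_natCast] at ih
        rw [PySem.List.slice_to_natCast]
        simp only [List.take_succ_cons, List.countP_cons]; rw [← ih]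
        by_cases hm : pvKeyMem num tail rel tripleDict = true <;> simp [hm] <;> omega

lemma go_eq_add_cnt (head tail rel : Int) (tripleDict : List (Int × Int × Int × Int))
    (array : List Int) : ∀ wa : Int,
    argwhereHeadGo head tail rel tripleDict array wa = wa + pvCnt head tail rel tripleDict array := by
  induction array with
  | nil => intro wa; simp [argwhereHeadGo, pvCnt]
  | cons num rest ih =>
    intro wa
    rw [argwhereHeadGo, pvCnt]
    by_cases h : (num == head) = true
    · simp [h]
    · simp only [h, if_false, Bool.false_eq_true]
      by_cases hm : pvKeyMem num tail rel tripleDict = true <;> simp only [hm, if_true, if_false, Bool.false_eq_true] <;> rw [ih] <;> ring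

-- ===== VERDICT (by name: the statement is the Claim_ definition above) =====
theorem argwhereHead_spec : Claim_equal_argwhereHead := by
  intro head tail rel array tripleDict _
  unfold Spec_argwhereHead argwhereHead
  rw [alt_eq_cnt, go_eq_add_cnt]
  ring
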